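-- pv_equiv track=rewrite | github.com/MozillaItalia/commonvoice-it | MITADS/utils/sanitize.py | getRomanNumbers
-- ===== SOURCE A (Python) =====
-- def getRomanNumbers(ch):
--   ROMAN_CHARS = "XVI"
--   ro  = ''
--   ros = 0
--   for i in range(len(ch)):
--     c = ch[i]
--     if c in ROMAN_CHARS:
--       if len(ro) == 0 and not ch[i-1].isalpha():
--         ro  = c
--         ros = i
--       else:
--         if len(ro) > 0 and ch[i-1] in ROMAN_CHARS:
--           ro += c
--     else:
--       if len(ro) > 0:
--         if not c.isalpha():
--           yield ch[ros-1], ch[i], ro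
--         ro  = ''
--         ros = i
--
--   if len(ro) > 0:
--     yield ch[ros-1], '', ro
-- ===== SOURCE B (Python) =====
-- import re
--
-- def getRomanNumbers(ch):
--   for m in re.finditer('[XVI]+', ch):
--     s, e, t = m.start(), m.end(), m.group()
--     prev = ch[s - 1]            # s == 0 refers to ch[-1], the last char, as in the original
--     if prev.isalpha():
--       continue
--     if e == len(ch):
--       yield prev, '', t
--     elif not ch[e].isalpha():
--       yield prev, ch[e], t
-- ===== Notes on version B (the rewrite author's own statement) =====
-- stated objective: idiomatic
-- what changed: Replaces the char-by-char accumulator state machine with re.finditer over the Roman-letter character class: enumerate each maximal run once and classify its two boundary characters.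
import Mathlib
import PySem

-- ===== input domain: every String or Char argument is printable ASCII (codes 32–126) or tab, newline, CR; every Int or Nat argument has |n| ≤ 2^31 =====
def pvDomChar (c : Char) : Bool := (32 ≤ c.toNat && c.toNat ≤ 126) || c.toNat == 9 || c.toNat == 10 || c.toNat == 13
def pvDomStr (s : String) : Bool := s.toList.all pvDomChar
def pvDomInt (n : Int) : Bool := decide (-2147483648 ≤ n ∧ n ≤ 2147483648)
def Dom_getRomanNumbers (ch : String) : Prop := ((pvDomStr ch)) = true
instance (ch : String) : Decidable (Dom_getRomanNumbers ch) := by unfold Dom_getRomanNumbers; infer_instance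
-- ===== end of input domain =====

-- B replaces A's incremental accumulator state machine by a find-maximal-runs-then-classify-boundaries
-- pass (re.finditer in Python); equivalence of the returned (generated) list is proved for all inputs.

-- shared trivia: membership in ROMAN_CHARS = "XVI", and ch[i] (index always in range where used;
-- negative index -1 wraps to the last char, exactly PySem.List.pyGet?)
def isRomanC (c : Char) : Bool := c == 'X' || c == 'V' || c == 'I'
def pyGetC (l : List Char) (i : Int) : Char := (PySem.List.pyGet? l i).getD ' '

-- ===== PORT A =====
-- the for-loop over range(len(ch)) with state (ro, ros); `out` collects the yields
def gRNloop (full : List Char) : List Char → Nat → List Char → Nat →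
    List (String × String × String) → List (String × String × String)
  | [], _i, ro, ros, out =>
      if 0 < ro.length then
        out ++ [(String.ofList [pyGetC full ((ros : Int) - 1)], "", String.ofList ro)]
      else out
  | c :: rest, i, ro, ros, out =>
      if isRomanC c = true then
        if ro.length = 0 ∧ PySem.Chars.isalpha (pyGetC full ((i : Int) - 1)) = false then
          gRNloop full rest (i + 1) [c] i out
        else if 0 < ro.length ∧ isRomanC (pyGetC full ((i : Int) - 1)) = true then
          gRNloop full rest (i + 1) (ro ++ [c]) ros out
        else
          gRNloop full rest (i + 1) ro ros out
      else
        if 0 < ro.length then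
          gRNloop full rest (i + 1) [] i
            (out ++ (if PySem.Chars.isalpha c = false then
              [(String.ofList [pyGetC full ((ros : Int) - 1)], String.ofList [c], String.ofList ro)] else []))
        else
          gRNloop full rest (i + 1) ro ros out

def getRomanNumbers (ch : String) : List (String × String × String) :=
  gRNloop ch.toList ch.toList 0 [] 0 []

-- ===== PORT B =====
-- re.finditer('[XVI]+', ch): the maximal runs of Roman letters, each with its start index
def findRuns : List Char → Nat → List (Nat × List Char)
  | [], _ => []
  | c :: rest, i =>
      if isRomanC c = true then
        (i, c :: rest.takeWhile isRomanC) ::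
          findRuns (rest.dropWhile isRomanC) (i + 1 + (rest.takeWhile isRomanC).length)
      else findRuns rest (i + 1)
  termination_by l _ => l.length
  decreasing_by
  · exact Nat.lt_succ_of_le (List.length_dropWhile_le _ _)
  · exact Nat.lt_succ_of_le (Nat.le_refl _)

-- the loop body of B: classify one match (start s, text t) by its boundary characters
def classify (full : List Char) (s : Nat) (t : List Char) : Option (String × String × String) :=
  let prev := pyGetC full ((s : Int) - 1)
  if PySem.Chars.isalpha prev = true then none
  else if s + t.length = full.length then some (String.ofList [prev], "", String.ofList t)
  else if PySem.Chars.isalpha (pyGetC full ((s + t.length : Nat) : Int)) = true then none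
  else some (String.ofList [prev], String.ofList [pyGetC full ((s + t.length : Nat) : Int)], String.ofList t)

def getRomanNumbers_alt (ch : String) : List (String × String × String) :=
  (findRuns ch.toList 0).filterMap (fun p => classify ch.toList p.1 p.2)

-- ===== PRECONDITION & SPEC =====
def Spec_getRomanNumbers (ch : String) (out : List (String × String × String)) : Prop := out = getRomanNumbers_alt ch
instance (ch : String) (out : List (String × String × String)) : Decidable (Spec_getRomanNumbers ch out) := by unfold Spec_getRomanNumbers; infer_instance

-- ===== CLAIM (what is proved, stated in full; the proofs are below) =====
def Claim_equal_getRomanNumbers : Prop := ∀ (ch : String), Dom_getRomanNumbers ch → Spec_getRomanNumbers ch (getRomanNumbers ch)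

-- ===== LEMMAS AND PROOFS =====

theorem filterMap_cons_toList {α β : Type} (f : α → Option β) (a : α) (l : List α) :
    (a :: l).filterMap f = (f a).toList ++ l.filterMap f := by
  cases h : f a <;> simp [h]

theorem getC_drop (full rest : List Char) (c : Char) (i : Nat) (h : full.drop i = c :: rest) :
    pyGetC full (i : Int) = c := by
  have h1 : full[i]? = some c := by
    rw [← List.head?_drop, h]; rfl
  simp [pyGetC, PySem.List.pyGet?_natCast, h1]

theorem drop_succ_of_drop (full rest : List Char) (c : Char) (i : Nat)
    (h : full.drop i = c :: rest) : full.drop (i + 1) = rest := by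
  have : (full.drop i).drop 1 = rest := by rw [h]; rfl
  simpa [List.drop_drop, Nat.add_comm] using this

theorem len_of_drop (full rest : List Char) (c : Char) (i : Nat)
    (h : full.drop i = c :: rest) : i < full.length ∧ full.length = i + 1 + rest.length := by
  have := congrArg List.length h
  simp [List.length_drop] at this
  omega

theorem roman_alpha (c : Char) (h : isRomanC c = true) : PySem.Chars.isalpha c = true := by
  have h' : c = 'X' ∨ c = 'V' ∨ c = 'I' := by
    simpa [isRomanC, or_assoc] using h
  rcases h' with rfl | rfl | rfl <;> decide

-- dropping a leading Roman run whose preceding character is alphabetic changes nothing: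
-- both that run (by the prev-alpha guard) and any run B would see inside it are classified away
theorem proc_skip_run (full rest : List Char) (i : Nat)
    (hdrop : full.drop i = rest)
    (halpha : PySem.Chars.isalpha (pyGetC full ((i : Int) - 1)) = true) :
    (findRuns rest i).filterMap (fun p => classify full p.1 p.2) =
      (findRuns (rest.dropWhile isRomanC) (i + (rest.takeWhile isRomanC).length)).filterMap
        (fun p => classify full p.1 p.2) := by
  cases rest with
  | nil => simp [List.takeWhile, List.dropWhile]
  | cons c tail =>
    by_cases hc : isRomanC c = true
    · rw [findRuns]
      simp only [hc, if_pos]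
      rw [filterMap_cons_toList]
      have hcl : classify full i (c :: tail.takeWhile isRomanC) = none := by
        simp [classify, halpha]
      rw [hcl]
      simp [hc]
      ring_nf
    · simp [hc]


-- end of the string: the final yield of a live run / nothing when the accumulator is empty
theorem gRNloop_base (full : List Char) (i ros : Nat) (ro : List Char)
    (out : List (String × String × String))
    (hdrop : full.drop i = []) (hi : i ≤ full.length) :
    ((ro = [] → gRNloop full [] i ro ros out =
        out ++ (findRuns ([] : List Char) i).filterMap (fun p => classify full p.1 p.2))
     ∧ (ro ≠ [] → ros + ro.length = i →
        PySem.Chars.isalpha (pyGetC full ((ros : Int) - 1)) = false →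
        isRomanC (pyGetC full ((i : Int) - 1)) = true →
        gRNloop full [] i ro ros out =
          out ++ (classify full ros (ro ++ ([] : List Char).takeWhile isRomanC)).toList
              ++ (findRuns (([] : List Char).dropWhile isRomanC)
                    (i + (([] : List Char).takeWhile isRomanC).length)).filterMap
                   (fun p => classify full p.1 p.2))) := by
  have hieq : i = full.length := by
    have := congrArg List.length hdrop
    simp [List.length_drop] at this
    omega
  constructor
  · intro hro; subst hro; simp [gRNloop, findRuns]
  · intro hro he hstart hprev
    have hlen : 0 < ro.length := List.length_pos_iff.mpr hro
    have hcl : classify full ros ro = some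
        (String.ofList [pyGetC full ((ros : Int) - 1)], "", String.ofList ro) := by
      simp [classify, hstart]
      omega
    simp [gRNloop, hlen, findRuns, List.takeWhile, List.dropWhile, hcl]

-- the main invariant: with an empty accumulator A's remaining loop produces exactly B's
-- classification of the remaining runs; with a live run (ro, ros) it produces the classification
-- of that run extended by the Roman prefix of the rest, then the remaining runs
theorem gRNloop_invariant (full : List Char) (n : Nat) : ∀ (rest : List Char) (i ros : Nat)
    (ro : List Char) (out : List (String × String × String)),
    rest.length ≤ n → full.drop i = rest → i ≤ full.length →
    ((ro = [] → gRNloop full rest i ro ros out =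
        out ++ (findRuns rest i).filterMap (fun p => classify full p.1 p.2))
     ∧ (ro ≠ [] → ros + ro.length = i →
        PySem.Chars.isalpha (pyGetC full ((ros : Int) - 1)) = false →
        isRomanC (pyGetC full ((i : Int) - 1)) = true →
        gRNloop full rest i ro ros out =
          out ++ (classify full ros (ro ++ rest.takeWhile isRomanC)).toList
              ++ (findRuns (rest.dropWhile isRomanC) (i + (rest.takeWhile isRomanC).length)).filterMap
                   (fun p => classify full p.1 p.2))) := by
  induction n with
  | zero =>
    intro rest i ros ro out hn hdrop hi
    have hrest : rest = [] := List.length_eq_zero_iff.mp (Nat.le_zero.mp hn)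
    subst hrest
    exact gRNloop_base full i ros ro out hdrop hi
  | succ n ih =>
    intro rest i ros ro out hn hdrop hi
    cases rest with
    | nil =>
      exact gRNloop_base full i ros ro out hdrop hi
    | cons c tail =>
      have htail : full.drop (i + 1) = tail := drop_succ_of_drop full tail c i hdrop
      have hlen := len_of_drop full tail c i hdrop
      have hgetc : pyGetC full (i : Int) = c := getC_drop full tail c i hdrop
      have htl : tail.length ≤ n := by
        simp at hn; omega
      constructor
      · -- accumulator empty
        intro hro; subst hro
        by_cases hc : isRomanC c = true
        · by_cases ha : PySem.Chars.isalpha (pyGetC full ((i : Int) - 1)) = true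
          · -- run start preceded by an alphabetic char: A skips the char; B drops the run
            have hstep : gRNloop full (c :: tail) i [] ros out = gRNloop full tail (i + 1) [] ros out := by
              simp [gRNloop, hc, ha]
            rw [hstep,
              (ih tail (i + 1) ros [] out htl htail (by omega)).1 rfl]
            rw [findRuns]
            simp only [hc, if_pos]
            rw [filterMap_cons_toList]
            have hcl : classify full i (c :: tail.takeWhile isRomanC) = none := by
              simp [classify, ha]
            rw [hcl]
            have hskip := proc_skip_run full tail (i + 1) htail
              (by simpa [hgetc] using roman_alpha c hc)
            rw [hskip]
            simp
          · -- run starts here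
            have ha' : PySem.Chars.isalpha (pyGetC full ((i : Int) - 1)) = false := by
              simpa using ha
            have hstep : gRNloop full (c :: tail) i [] ros out =
                gRNloop full tail (i + 1) [c] i out := by
              simp [gRNloop, hc, ha']
            rw [hstep,
              (ih tail (i + 1) i [c] out htl htail (by omega)).2 (by simp) (by simp)
                ha' (by simp [hgetc, hc])]
            rw [findRuns]
            simp only [hc, if_pos]
            rw [filterMap_cons_toList]
            simp [List.append_assoc]
        · -- not a Roman char, accumulator empty: plain skip
          have hstep : gRNloop full (c :: tail) i [] ros out = gRNloop full tail (i + 1) [] ros out := by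
            simp [gRNloop, hc]
          rw [hstep, (ih tail (i + 1) ros [] out htl htail (by omega)).1 rfl, findRuns]
          simp [hc]
      · -- live run (ro, ros)
        intro hro he hstart hprev
        have hlen0 : 0 < ro.length := List.length_pos_iff.mpr hro
        by_cases hc : isRomanC c = true
        · -- run continues
          have hstep : gRNloop full (c :: tail) i ro ros out =
              gRNloop full tail (i + 1) (ro ++ [c]) ros out := by
            simp [gRNloop, hc, hlen0, hprev]
            intro h
            exact absurd h hro
          rw [hstep,
            (ih tail (i + 1) ros (ro ++ [c]) out htl htail (by omega)).2 (by simp)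
              (by simp; omega) hstart (by simp [hgetc, hc])]
          simp [hc, List.append_assoc]
          rw [show i + ((List.takeWhile isRomanC tail).length + 1) =
              i + 1 + (List.takeWhile isRomanC tail).length from by omega]
        · -- run ends at this non-Roman char
          have hstep : gRNloop full (c :: tail) i ro ros out =
              gRNloop full tail (i + 1) [] i
                (out ++ (if PySem.Chars.isalpha c = false then
                  [(String.ofList [pyGetC full ((ros : Int) - 1)], String.ofList [c], String.ofList ro)] else [])) := by
            simp [gRNloop, hc, hlen0]
          rw [hstep, (ih tail (i + 1) i []
              (out ++ (if PySem.Chars.isalpha c = false then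
                [(String.ofList [pyGetC full ((ros : Int) - 1)], String.ofList [c], String.ofList ro)] else []))
              htl htail (by omega)).1 rfl]
          have hne : i ≠ full.length := by omega
          have hcl : classify full ros (ro ++ (c :: tail).takeWhile isRomanC) =
              if PySem.Chars.isalpha c = true then none
              else some (String.ofList [pyGetC full ((ros : Int) - 1)], String.ofList [c], String.ofList ro) := by
            simp [classify, hstart, he, hne, hgetc, hc]
          rw [hcl]
          rw [show ((c :: tail).dropWhile isRomanC) = c :: tail by simp [hc]]
          rw [show i + ((c :: tail).takeWhile isRomanC).length = i by simp [hc]]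
          rw [findRuns]
          simp only [hc, if_neg, Bool.false_eq_true, not_false_iff]
          by_cases hca : PySem.Chars.isalpha c = true <;> simp [hca, List.append_assoc]

-- ===== VERDICT (by name: the statement is the Claim_ definition above) =====
theorem getRomanNumbers_spec : Claim_equal_getRomanNumbers := by
  intro ch _
  unfold Spec_getRomanNumbers getRomanNumbers getRomanNumbers_alt
  simpa using
    (gRNloop_invariant ch.toList ch.toList.length ch.toList 0 0 [] [] (Nat.le_refl _)
      (by simp) (by simp)).1 rfl
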